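-- pv_equiv track=rewrite | github.com/JaimyWal/KNMIproject | RegionalTrends/Outdated/ComputeTendencies_backup.py | interval_pairs
-- ===== SOURCE A (Python) =====
-- def interval_pairs(group_year, group_same_key, relation='previous_interval'):
--
--     n = len(group_year)
--
--     if relation == 'previous_interval':
--         return [(ii - 1, ii) for ii in range(1, n)]
--
--     if relation == 'previous_year_same_interval':
--         lookup = {(int(group_year[ii]), group_same_key[ii]): ii for ii in range(n)}
--         pairs = []
--         for ii in range(n):
--             prev = lookup.get((int(group_year[ii]) - 1, group_same_key[ii]))
--             if prev is not None:
--                 pairs.append((prev, ii))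
--         return pairs
-- ===== SOURCE B (Python) =====
-- def interval_pairs(group_year, group_same_key, relation='previous_interval'):
--
--     n = len(group_year)
--
--     if relation == 'previous_interval':
--         return list(zip(range(n - 1), range(1, n)))
--
--     if relation == 'previous_year_same_interval':
--         pairs = []
--         for key in dict.fromkeys(group_same_key[ii] for ii in range(n)):
--             entries = [(int(group_year[ii]), ii) for ii in range(n)
--                        if group_same_key[ii] == key]
--             year_to_last = {year: idx for year, idx in entries}
--             for year, idx in entries:
--                 prev = year_to_last.get(year - 1)
--                 if prev is not None:
--                     pairs.append((prev, idx))
--         pairs.sort(key=lambda p: p[1])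
--         return pairs
-- ===== Notes on version B (the rewrite author's own statement) =====
-- stated objective: alternative
-- what changed: The previous_year_same_interval branch is recomputed per key group: distinct keys are enumerated in first-occurrence order, each group gets its own year-to-last-index map, pairs are emitted group by group and finally sorted by the second index, instead of one global (year,key)-keyed dict probed in a single index loop.
import Mathlib
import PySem

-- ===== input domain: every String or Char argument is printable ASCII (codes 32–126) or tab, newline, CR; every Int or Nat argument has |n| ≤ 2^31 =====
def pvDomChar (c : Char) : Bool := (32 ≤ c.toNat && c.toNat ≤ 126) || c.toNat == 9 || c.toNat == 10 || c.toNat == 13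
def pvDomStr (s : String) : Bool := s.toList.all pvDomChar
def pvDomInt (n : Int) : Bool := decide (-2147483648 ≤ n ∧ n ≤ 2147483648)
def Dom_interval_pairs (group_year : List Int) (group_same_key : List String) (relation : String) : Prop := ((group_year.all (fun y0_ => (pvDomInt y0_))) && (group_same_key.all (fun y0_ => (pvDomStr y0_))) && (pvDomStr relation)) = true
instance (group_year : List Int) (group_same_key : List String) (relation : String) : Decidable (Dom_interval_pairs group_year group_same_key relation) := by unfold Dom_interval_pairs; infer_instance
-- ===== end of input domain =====

-- B regroups the previous_year_same_interval branch per key (distinct keys in order, a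
-- per-group year→last-index map, final sort by the second index) instead of one global
-- (year,key)-keyed dict probed in a single index loop; equal cost, alternative structure.

-- ===== PORT A =====
-- Literal port of A.  Indices ii ∈ range(n) are in range for group_year always and for
-- group_same_key under Pre_; pyGetD is exact there.
def interval_pairs (group_year : List Int) (group_same_key : List String) (relation : String) : Option (List (Int × Int)) :=
  let n := group_year.length
  if relation = "previous_interval" then
    some ((PySem.List.pyRange 1 (n : Int) 1).map (fun ii => (ii - 1, ii)))
  else if relation = "previous_year_same_interval" then
    -- lookup = {(int(group_year[ii]), group_same_key[ii]): ii for ii in range(n)}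
    let lookup : PySem.Dict (Int × String) Int :=
      (List.range n).foldl
        (fun d (ii : Nat) => d.insert (PySem.List.pyGetD group_year (ii : Int) 0,
                               PySem.List.pyGetD group_same_key (ii : Int) "") (ii : Int))
        PySem.Dict.empty
    let pairs : List (Int × Int) :=
      (List.range n).foldl
        -- prev = lookup.get(…); if prev is not None: pairs.append((prev, ii))
        (fun ps (ii : Nat) =>
          (lookup.get? (PySem.List.pyGetD group_year (ii : Int) 0 - 1,
                        PySem.List.pyGetD group_same_key (ii : Int) "")).elim ps
            (fun prev => ps ++ [(prev, (ii : Int))]))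
        []
    some pairs
  else
    none

-- ===== PORT B =====
-- Literal port of Source B (same indexing caveat as port A).
def interval_pairs_alt (group_year : List Int) (group_same_key : List String) (relation : String) : Option (List (Int × Int)) :=
  let n := group_year.length
  if relation = "previous_interval" then
    some (List.zip (PySem.List.pyRange 0 ((n : Int) - 1) 1) (PySem.List.pyRange 1 (n : Int) 1))
  else if relation = "previous_year_same_interval" then
    -- for key in dict.fromkeys(group_same_key[ii] for ii in range(n)): …
    let keys : List String :=
      PySem.List.dedup ((List.range n).map (fun (ii : Nat) => PySem.List.pyGetD group_same_key (ii : Int) ""))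
    let pairs : List (Int × Int) :=
      keys.foldl
        (fun ps key =>
          let entries : List (Int × Int) :=
            (List.range n).filterMap
              (fun (ii : Nat) => if PySem.List.pyGetD group_same_key (ii : Int) "" = key then
                           some (PySem.List.pyGetD group_year (ii : Int) 0, (ii : Int))
                         else none)
          let yearToLast : PySem.Dict Int Int :=
            entries.foldl (fun d e => d.insert e.1 e.2) PySem.Dict.empty
          -- prev = year_to_last.get(year - 1); if prev is not None: pairs.append((prev, idx))
          entries.foldl
            (fun ps e => (yearToLast.get? (e.1 - 1)).elim ps (fun prev => ps ++ [(prev, e.2)]))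
            ps)
        []
    some (PySem.List.sorted pairs (fun p => p.2))
  else
    none

-- ===== PRECONDITION & SPEC =====
-- Pre_ excludes only the inputs where the Python raises IndexError: in the
-- previous_year_same_interval branch both programs index group_same_key[ii] for ii < len(group_year).
def Pre_interval_pairs (group_year : List Int) (group_same_key : List String) (relation : String) : Prop :=
  relation = "previous_year_same_interval" → group_year.length ≤ group_same_key.length
instance (group_year : List Int) (group_same_key : List String) (relation : String) : Decidable (Pre_interval_pairs group_year group_same_key relation) := by unfold Pre_interval_pairs; infer_instance
def pvWitness_interval_pairs : List Int × List String × String :=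
  ([2000, 2001, 2001], ["a", "a", "b"], "previous_year_same_interval")
def Spec_interval_pairs (group_year : List Int) (group_same_key : List String) (relation : String) (out : Option (List (Int × Int))) : Prop := out = interval_pairs_alt group_year group_same_key relation
instance (group_year : List Int) (group_same_key : List String) (relation : String) (out : Option (List (Int × Int))) : Decidable (Spec_interval_pairs group_year group_same_key relation out) := by unfold Spec_interval_pairs; infer_instance

-- ===== CLAIM (what is proved, stated in full; the proofs are below) =====
def Claim_equal_interval_pairs : Prop := ∀ (group_year : List Int) (group_same_key : List String) (relation : String), Dom_interval_pairs group_year group_same_key relation → Pre_interval_pairs group_year group_same_key relation → Spec_interval_pairs group_year group_same_key relation (interval_pairs group_year group_same_key relation)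

-- ===== LEMMAS AND PROOFS =====

-- Abbreviations for the proof (names only; the ports above do not use them).
def pvKey (group_same_key : List String) (i : Nat) : String := PySem.List.pyGetD group_same_key (i : Int) ""
def pvYear (group_year : List Int) (i : Nat) : Int := PySem.List.pyGetD group_year (i : Int) 0
def pvLastIdx (group_year : List Int) (group_same_key : List String) (t : Int × String) : Option Int :=
  ((List.range group_year.length).reverse.find?
      (fun i => ((pvYear group_year i, pvKey group_same_key i) : Int × String) == t)).map (fun i => (i : Int))
def pvAelem (group_year : List Int) (group_same_key : List String) (i : Nat) : Option (Int × Int) :=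
  (pvLastIdx group_year group_same_key (pvYear group_year i - 1, pvKey group_same_key i)).map (fun j => (j, (i : Int)))
def pvApairs (group_year : List Int) (group_same_key : List String) : List (Int × Int) :=
  (List.range group_year.length).filterMap (pvAelem group_year group_same_key)

theorem pvFilterMap_cons' {α β : Type} (f : α → Option β) (a : α) (l : List α) :
    List.filterMap f (a :: l) = (f a).toList ++ List.filterMap f l := by
  cases h : f a <;> simp [h]

theorem pvFoldl_match_append {α β γ : Type} (q : α → Option γ) (e : α → γ → β) (l : List α) (acc : List β) :
    l.foldl (fun ps x => (q x).elim ps (fun v => ps ++ [e x v])) acc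
      = acc ++ l.filterMap (fun x => (q x).map (e x)) := by
  induction l generalizing acc with
  | nil => simp
  | cons a l ih => cases h : q a <;> simp [h, ih]

theorem pvGet?_foldl_insert {ι κ ν : Type} [BEq κ] [LawfulBEq κ] (f : ι → κ) (g : ι → ν)
    (l : List ι) (d : PySem.Dict κ ν) (t : κ) :
    ((l.foldl (fun d i => d.insert (f i) (g i)) d).get? t)
      = ((l.reverse.find? (fun i => f i == t)).map g).or (d.get? t) := by
  induction l generalizing d with
  | nil => simp
  | cons a l ih =>
    rw [List.foldl_cons, ih, List.reverse_cons, List.find?_append]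
    cases h : l.reverse.find? (fun i => f i == t) with
    | some i => simp
    | none =>
      by_cases hf : f a = t
      · subst hf; simp [PySem.Dict.get?_insert_self]
      · simp [hf, PySem.Dict.get?_insert_of_ne d (g a) (Ne.symm hf)]

theorem pvFind?_entries (group_year : List Int) (group_same_key : List String)
    (l : List Nat) (t : Int) (key : String) :
    ((l.filterMap (fun ii => if pvKey group_same_key ii = key then
          some (pvYear group_year ii, (ii : Int)) else none)).find? (fun p => p.1 == t)).map Prod.snd
      = (l.find? (fun i => ((pvYear group_year i, pvKey group_same_key i) : Int × String) == (t, key))).map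
          (fun i => (i : Int)) := by
  induction l with
  | nil => simp
  | cons a l ih =>
    rw [pvFilterMap_cons']
    by_cases hk : pvKey group_same_key a = key
    · rw [if_pos hk]
      by_cases hy : pvYear group_year a = t
      · rw [Option.toList_some, List.singleton_append,
            List.find?_cons_of_pos (by simp [hy]),
            List.find?_cons_of_pos (by simp [hy, hk])]
        simp
      · rw [Option.toList_some, List.singleton_append,
            List.find?_cons_of_neg (by simp [hy]),
            List.find?_cons_of_neg (by simp [hy, Prod.ext_iff])]
        exact ih
    · rw [if_neg hk, Option.toList_none, List.nil_append,
          List.find?_cons_of_neg (by simp [hk, Prod.ext_iff])]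
      exact ih

theorem pvFlatMap_append_perm {α β : Type} (c r : α → List β) (ks : List α) :
    (ks.flatMap (fun k => c k ++ r k)).Perm (ks.flatMap c ++ ks.flatMap r) := by
  induction ks with
  | nil => simp
  | cons k ks ih =>
    simp only [List.flatMap_cons, List.append_assoc]
    have h2 : (r k ++ (ks.flatMap c ++ ks.flatMap r)).Perm
        (ks.flatMap c ++ (r k ++ ks.flatMap r)) := by
      rw [← List.append_assoc, ← List.append_assoc]
      exact List.Perm.append_right (ks.flatMap r) List.perm_append_comm
    exact List.Perm.append_left (c k) ((ih.append_left (r k)).trans h2)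

theorem pvFlatMap_if_single {κ β : Type} [DecidableEq κ] (ks : List κ) (nd : ks.Nodup)
    (y : κ) (zs : List β) :
    ks.flatMap (fun k => if y = k then zs else []) = if y ∈ ks then zs else [] := by
  induction ks with
  | nil => simp
  | cons k ks ih =>
    rcases List.nodup_cons.mp nd with ⟨hk, nd'⟩
    by_cases h : y = k
    · subst h
      simp [List.flatMap_cons, ih nd', hk]
    · simp [List.flatMap_cons, h, ih nd']

theorem pvFlatMap_key_perm {α β κ : Type} [DecidableEq κ] (kf : α → κ) (h : α → Option β)
    (l : List α) (ks : List κ) (nd : ks.Nodup) (cov : ∀ a ∈ l, kf a ∈ ks) :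
    (ks.flatMap (fun key => l.filterMap (fun a => if kf a = key then h a else none))).Perm
      (l.filterMap h) := by
  induction l with
  | nil => simp
  | cons a l ih =>
    have cov' : ∀ x ∈ l, kf x ∈ ks := fun x hx => cov x (List.mem_cons_of_mem a hx)
    have step : (ks.flatMap (fun key => (a :: l).filterMap (fun x => if kf x = key then h x else none)))
        = ks.flatMap (fun key => (if kf a = key then h a else none).toList
            ++ l.filterMap (fun x => if kf x = key then h x else none)) := by
      simp only [pvFilterMap_cons']
    have hsingle : ks.flatMap (fun key => (if kf a = key then h a else none).toList) = (h a).toList := by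
      have hfun : (fun key => (if kf a = key then h a else none).toList)
          = (fun key => if kf a = key then (h a).toList else []) := by
        funext key; by_cases hh : kf a = key <;> simp [hh]
      rw [hfun, pvFlatMap_if_single ks nd (kf a) ((h a).toList),
          if_pos (cov a List.mem_cons_self)]
    rw [step, pvFilterMap_cons' h a l]
    exact (pvFlatMap_append_perm _ _ ks).trans
      (by rw [hsingle]; exact (ih cov').append_left _)

theorem pvApairs_pairwise (group_year : List Int) (group_same_key : List String) :
    (pvApairs group_year group_same_key).Pairwise (fun p q => p.2 < q.2) := by
  unfold pvApairs
  rw [List.pairwise_filterMap]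
  refine List.Pairwise.imp ?_ (List.pairwise_lt_range (n := group_year.length))
  intro i j hij b hb b' hb'
  unfold pvAelem at hb hb'
  rcases Option.map_eq_some_iff.mp hb with ⟨x, _, hx⟩
  rcases Option.map_eq_some_iff.mp hb' with ⟨x', _, hx'⟩
  subst hx hx'
  show ((i : Nat) : Int) < ((j : Nat) : Int)
  exact_mod_cast hij

theorem pvRange_one_eq (a b : Int) :
    PySem.List.pyRange a b 1 = (List.range (b - a).toNat).map (fun k : Nat => a + (k : Int)) := by
  by_cases h : a < b
  · rw [PySem.List.pyRange]
    norm_num [h]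
  · have h0 : (b - a).toNat = 0 := by omega
    rw [PySem.List.pyRange]
    norm_num [h, h0]

theorem pvZip_eq (n : Nat) :
    List.zip (PySem.List.pyRange 0 ((n : Int) - 1) 1) (PySem.List.pyRange 1 (n : Int) 1)
      = (PySem.List.pyRange 1 (n : Int) 1).map (fun ii => (ii - 1, ii)) := by
  rw [pvRange_one_eq, pvRange_one_eq]
  have h1 : ((n : Int) - 1 - 0).toNat = ((n : Int) - 1).toNat := by omega
  rw [h1, List.zip_map', List.map_map]
  exact List.map_congr_left (fun k _ => by simp)

theorem pvA_branch2 (group_year : List Int) (group_same_key : List String) :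
    interval_pairs group_year group_same_key "previous_year_same_interval"
      = some (pvApairs group_year group_same_key) := by
  simp only [interval_pairs, reduceIte]
  refine congrArg some ?_
  refine Eq.trans (pvFoldl_match_append
      (fun ii : Nat =>
        ((List.range group_year.length).foldl
            (fun d (ii : Nat) => d.insert (PySem.List.pyGetD group_year (ii : Int) 0,
                PySem.List.pyGetD group_same_key (ii : Int) "") (ii : Int))
            PySem.Dict.empty).get?
          (PySem.List.pyGetD group_year (ii : Int) 0 - 1, PySem.List.pyGetD group_same_key (ii : Int) ""))
      (fun (ii : Nat) (prev : Int) => (prev, (ii : Int))) (List.range group_year.length) []) ?_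
  rw [List.nil_append]
  refine List.filterMap_congr ?_
  intro ii _
  rw [pvGet?_foldl_insert
      (fun ii : Nat => (PySem.List.pyGetD group_year (ii : Int) 0, PySem.List.pyGetD group_same_key (ii : Int) ""))
      (fun ii : Nat => (ii : Int))]
  simp [pvAelem, pvLastIdx, pvYear, pvKey, Function.comp, Option.map_eq_bind]

theorem pvYearToLast (group_year : List Int) (group_same_key : List String) (key : String) (t : Int) :
    (((List.range group_year.length).filterMap
        (fun (ii : Nat) => if PySem.List.pyGetD group_same_key (ii : Int) "" = key then
            some (PySem.List.pyGetD group_year (ii : Int) 0, (ii : Int)) else none)).foldl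
      (fun d (e : Int × Int) => d.insert e.1 e.2) PySem.Dict.empty).get? t
      = pvLastIdx group_year group_same_key (t, key) := by
  rw [pvGet?_foldl_insert (fun e : Int × Int => e.1) (fun e : Int × Int => e.2),
      PySem.Dict.get?_empty, Option.or_none, ← List.filterMap_reverse]
  have h := pvFind?_entries group_year group_same_key ((List.range group_year.length).reverse) t key
  simpa [pvKey, pvYear, pvLastIdx] using h

theorem pvB_branch2 (group_year : List Int) (group_same_key : List String) :
    interval_pairs_alt group_year group_same_key "previous_year_same_interval"
      = some (pvApairs group_year group_same_key) := by
  simp only [interval_pairs_alt, reduceIte]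
  refine congrArg some ?_
  refine PySem.List.sorted_eq_of_perm_of_pairwise_lt _ _ _ ?_
    (pvApairs_pairwise group_year group_same_key)
  have hinner : ∀ (ps : List (Int × Int)) (key : String),
      ((List.range group_year.length).filterMap
          (fun (ii : Nat) => if PySem.List.pyGetD group_same_key (ii : Int) "" = key then
              some (PySem.List.pyGetD group_year (ii : Int) 0, (ii : Int)) else none)).foldl
        (fun ps (e : Int × Int) =>
          ((((List.range group_year.length).filterMap
              (fun (ii : Nat) => if PySem.List.pyGetD group_same_key (ii : Int) "" = key then
                  some (PySem.List.pyGetD group_year (ii : Int) 0, (ii : Int)) else none)).foldl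
                (fun d (e : Int × Int) => d.insert e.1 e.2) PySem.Dict.empty).get? (e.1 - 1)).elim ps
            (fun prev => ps ++ [(prev, e.2)])) ps
      = ps ++ (List.range group_year.length).filterMap
          (fun i => if pvKey group_same_key i = key then pvAelem group_year group_same_key i else none) := by
    intro ps key
    refine Eq.trans (pvFoldl_match_append
        (fun e : Int × Int =>
          (((List.range group_year.length).filterMap
              (fun (ii : Nat) => if PySem.List.pyGetD group_same_key (ii : Int) "" = key then
                  some (PySem.List.pyGetD group_year (ii : Int) 0, (ii : Int)) else none)).foldl
                (fun d (e : Int × Int) => d.insert e.1 e.2) PySem.Dict.empty).get? (e.1 - 1))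
        (fun (e : Int × Int) (prev : Int) => (prev, e.2))
        ((List.range group_year.length).filterMap
          (fun (ii : Nat) => if PySem.List.pyGetD group_same_key (ii : Int) "" = key then
              some (PySem.List.pyGetD group_year (ii : Int) 0, (ii : Int)) else none)) ps) ?_
    congr 1
    rw [List.filterMap_filterMap]
    refine List.filterMap_congr ?_
    intro i _
    by_cases hk : PySem.List.pyGetD group_same_key (i : Int) "" = key
    · rw [if_pos hk, if_pos (show pvKey group_same_key i = key from hk)]
      show ((((List.range group_year.length).filterMap _).foldl _ PySem.Dict.empty).get?
          (PySem.List.pyGetD group_year (i : Int) 0 - 1)).map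
            (fun prev => (prev, (i : Int))) = _
      rw [pvYearToLast, ← hk]
      rfl
    · rw [if_neg hk, if_neg (show ¬(pvKey group_same_key i = key) from hk)]
      rfl
  rw [PySem.List.foldl_congr_mem _ _
      (fun ps key => ps ++ (List.range group_year.length).filterMap
          (fun i => if pvKey group_same_key i = key then pvAelem group_year group_same_key i else none))
      [] (fun ps key _ => hinner ps key),
    PySem.List.foldl_append_eq_flatMap, List.nil_append]
  exact (pvFlatMap_key_perm (fun i => pvKey group_same_key i) (pvAelem group_year group_same_key)
    (List.range group_year.length)
    (PySem.List.dedup ((List.range group_year.length).map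
        (fun (ii : Nat) => PySem.List.pyGetD group_same_key (ii : Int) "")))
    (PySem.List.nodup_dedup _)
    (fun a ha => (PySem.List.mem_dedup _ _).mpr (List.mem_map_of_mem ha))).symm

-- ===== VERDICT (by name: the statement is the Claim_ definition above) =====
theorem interval_pairs_spec : Claim_equal_interval_pairs := by
  intro group_year group_same_key relation _ _
  unfold Spec_interval_pairs
  by_cases h1 : relation = "previous_interval"
  · subst h1
    simp [interval_pairs, interval_pairs_alt, pvZip_eq]
  · by_cases h2 : relation = "previous_year_same_interval"
    · subst h2
      rw [pvA_branch2, pvB_branch2]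
    · rw [interval_pairs, interval_pairs_alt]
      simp only [if_neg h1, if_neg h2]
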